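-- pv_equiv track=rewrite | github.com/bo-i-od/FishonTestProjectRepository | activities/zhilei_config/block_draw/block_draw.py | get_final_cost
-- ===== SOURCE A (Python) =====
-- N=14
--
-- def get_final_cost(cost_list,pos_list):
--     final_cost_list=[]
--     for i in range(N):
--         for j_index in range(len(pos_list)):
--             j=pos_list[j_index]
--             if i+1<=j:
--                 final_cost_list.append(cost_list[j_index])
--                 break
--     return final_cost_list
-- ===== SOURCE B (Python) =====
-- N = 14
--
-- def get_final_cost(cost_list, pos_list):
--     # position-outer / slot-inner sweep with a fill mask, one pass over pos_list
--     chosen = [None] * N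
--     for j_index, j in enumerate(pos_list):
--         for i in range(N):
--             if chosen[i] is None and i + 1 <= j:
--                 chosen[i] = cost_list[j_index]
--     return [c for c in chosen if c is not None]
-- ===== Notes on version B (the rewrite author's own statement) =====
-- stated objective: alternative
-- what changed: Swapped the loop nesting: instead of rescanning pos_list from the start for each of the 14 slots, B makes one sweep over positions, filling a 14-slot mask with the first covering position's cost and finally emitting the filled slots in order.
import Mathlib
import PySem

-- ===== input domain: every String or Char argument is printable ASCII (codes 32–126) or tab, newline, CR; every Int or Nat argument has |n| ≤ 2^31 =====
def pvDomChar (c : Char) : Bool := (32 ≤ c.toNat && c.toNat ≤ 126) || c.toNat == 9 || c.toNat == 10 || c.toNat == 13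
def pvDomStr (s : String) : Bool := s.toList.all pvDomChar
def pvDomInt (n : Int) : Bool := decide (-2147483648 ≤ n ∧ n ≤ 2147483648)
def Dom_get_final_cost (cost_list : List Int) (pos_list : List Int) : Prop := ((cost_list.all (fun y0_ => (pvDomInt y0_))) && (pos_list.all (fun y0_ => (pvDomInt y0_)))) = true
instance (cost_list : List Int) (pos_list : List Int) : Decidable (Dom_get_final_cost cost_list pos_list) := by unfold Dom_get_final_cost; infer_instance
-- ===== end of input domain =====

-- B swaps the loop nesting (position-outer / slot-inner with a fill mask) instead of
-- rescanning pos_list per slot; equivalence of return values is proved on Pre_ (no IndexError).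

-- ===== PORT A =====
-- inner 'for j_index in range(len(pos_list)): … break' scan for one slot i
def pvScanA (cost_list : List Int) (i : Int) : List Int → Nat → Option Int
  | [], _ => none
  | j :: rest, idx =>
      if i + 1 ≤ j then some (PySem.List.pyGetD cost_list (idx : Int) 0)
      else pvScanA cost_list i rest (idx + 1)

def get_final_cost (cost_list : List Int) (pos_list : List Int) : List Int :=
  (List.range 14).foldl (fun acc i =>
    match pvScanA cost_list ((i : Nat) : Int) pos_list 0 with
    | some c => acc ++ [c]
    | none => acc) []

-- ===== PORT B =====
-- outer loop over positions; inner loop over the 14 slots updates the mask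
def pvFillB (cost_list : List Int) : List Int → Nat → List (Option Int) → List (Option Int)
  | [], _, chosen => chosen
  | j :: rest, idx, chosen =>
      pvFillB cost_list rest (idx + 1)
        (chosen.mapIdx (fun i c =>
          if c = none ∧ ((i : Nat) : Int) + 1 ≤ j then some (PySem.List.pyGetD cost_list (idx : Int) 0) else c))

def get_final_cost_alt (cost_list : List Int) (pos_list : List Int) : List Int :=
  (pvFillB cost_list pos_list 0 (List.replicate 14 none)).filterMap id

-- ===== PRECONDITION & SPEC =====
-- Pre_ excludes exactly the inputs where Python A raises IndexError: some slot's first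
-- covering position index is out of range of cost_list.
def Pre_get_final_cost (cost_list : List Int) (pos_list : List Int) : Prop :=
  ((List.range 14).all (fun i =>
    (pos_list.findIdx? (fun j => decide (((i : Nat) : Int) + 1 ≤ j))).all
      (fun k => k < cost_list.length))) = true
instance (cost_list : List Int) (pos_list : List Int) : Decidable (Pre_get_final_cost cost_list pos_list) := by unfold Pre_get_final_cost; infer_instance
def pvWitness_get_final_cost : List Int × List Int := ([5, 7], [3, 20])

def Spec_get_final_cost (cost_list : List Int) (pos_list : List Int) (out : List Int) : Prop := out = get_final_cost_alt cost_list pos_list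
instance (cost_list : List Int) (pos_list : List Int) (out : List Int) : Decidable (Spec_get_final_cost cost_list pos_list out) := by unfold Spec_get_final_cost; infer_instance

-- ===== CLAIM (what is proved, stated in full; the proofs are below) =====
def Claim_equal_get_final_cost : Prop := ∀ (cost_list : List Int) (pos_list : List Int), Dom_get_final_cost cost_list pos_list → Pre_get_final_cost cost_list pos_list → Spec_get_final_cost cost_list pos_list (get_final_cost cost_list pos_list)

-- ===== LEMMAS AND PROOFS =====

theorem pv_foldl_opt (f : Nat → Option Int) (l : List Nat) (acc : List Int) :
    l.foldl (fun acc i => match f i with | some c => acc ++ [c] | none => acc) acc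
      = acc ++ l.filterMap f := by
  induction l generalizing acc with
  | nil => simp
  | cons x xs ih =>
      simp only [List.foldl_cons, List.filterMap_cons]
      cases h : f x <;> simp [ih]

theorem pv_mapIdx_id (l : List (Option Int)) : l.mapIdx (fun _ c => c) = l := by
  induction l with
  | nil => simp
  | cons x xs ih => simp [List.mapIdx_cons, ih]

theorem pv_fill_spec (cost_list : List Int) :
    ∀ (pos : List Int) (idx : Nat) (chosen : List (Option Int)),
    pvFillB cost_list pos idx chosen
      = chosen.mapIdx (fun i c =>
          match c with
          | some v => some v
          | none => pvScanA cost_list ((i : Nat) : Int) pos idx) := by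
  intro pos
  induction pos with
  | nil =>
      intro idx chosen
      simp only [pvFillB]
      have : (fun (i : Nat) (c : Option Int) =>
          match c with
          | some v => some v
          | none => pvScanA cost_list ((i : Nat) : Int) [] idx)
          = fun _ c => c := by
        funext i c; cases c <;> simp [pvScanA]
      rw [this, pv_mapIdx_id]
  | cons j rest ih =>
      intro idx chosen
      simp only [pvFillB]
      rw [ih, List.mapIdx_mapIdx]
      congr 1
      funext i c
      cases c with
      | some v => simp
      | none =>
          by_cases h : ((i : Nat) : Int) + 1 ≤ j <;>
            simp [pvScanA, h]

theorem pv_mapIdx_replicate (g : Nat → Option Int → Option Int) :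
    ∀ n, (List.replicate n (none : Option Int)).mapIdx g
      = (List.range n).map (fun i => g i none) := by
  intro n
  induction n with
  | zero => simp
  | succ m ih =>
      rw [List.replicate_succ' , List.range_succ, List.mapIdx_append, ih]
      simp

theorem pv_a_eq (cost_list pos_list : List Int) :
    get_final_cost cost_list pos_list
      = (List.range 14).filterMap (fun i => pvScanA cost_list ((i : Nat) : Int) pos_list 0) := by
  unfold get_final_cost
  rw [pv_foldl_opt]
  simp

theorem pv_b_eq (cost_list pos_list : List Int) :
    get_final_cost_alt cost_list pos_list
      = (List.range 14).filterMap (fun i => pvScanA cost_list ((i : Nat) : Int) pos_list 0) := by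
  unfold get_final_cost_alt
  rw [pv_fill_spec, pv_mapIdx_replicate, List.filterMap_map]
  rfl

-- ===== VERDICT (by name: the statement is the Claim_ definition above) =====
theorem get_final_cost_spec : Claim_equal_get_final_cost := by
  intro cost_list pos_list _ _
  unfold Spec_get_final_cost
  rw [pv_a_eq, pv_b_eq]
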